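-- pv_equiv track=rewrite | github.com/jianglin7/PLC_transition_sequence_partition | Funct/b1.py | Do_partition
-- ===== SOURCE A (Python) =====
-- def Do_partition(S, Bp):
--     Partitioned_traces = []
--     Current_trace = []
--     for item in range(len(S)):
--         Current_trace.append(S[item])
--         if item != len(S) - 1 and ((S[item], S[item + 1]) in Bp):
--             Partitioned_traces.append(Current_trace)
--             Current_trace = []
--     if Current_trace:
--         Partitioned_traces.append(Current_trace)
--     return Partitioned_traces
-- ===== SOURCE B (Python) =====
-- def Do_partition(S, Bp):
--     rev = []  # traces in reverse order, each trace's items in reverse order; rev[-1] is the trace being grown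
--     for x in reversed(S):
--         if not rev:
--             rev.append([x])
--         elif (x, rev[-1][-1]) in Bp:
--             rev.append([x])
--         else:
--             rev[-1].append(x)
--     rev.reverse()
--     for g in rev:
--         g.reverse()
--     return rev
-- ===== Notes on version B (the rewrite author's own statement) =====
-- stated objective: alternative
-- what changed: B builds the partition back-to-front in one reversed pass, deciding from the head of the already-built output whether to start a new trace or prepend to the current one, instead of A's forward index loop with a pending current-trace accumulator and a final flush.
import Mathlib
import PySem

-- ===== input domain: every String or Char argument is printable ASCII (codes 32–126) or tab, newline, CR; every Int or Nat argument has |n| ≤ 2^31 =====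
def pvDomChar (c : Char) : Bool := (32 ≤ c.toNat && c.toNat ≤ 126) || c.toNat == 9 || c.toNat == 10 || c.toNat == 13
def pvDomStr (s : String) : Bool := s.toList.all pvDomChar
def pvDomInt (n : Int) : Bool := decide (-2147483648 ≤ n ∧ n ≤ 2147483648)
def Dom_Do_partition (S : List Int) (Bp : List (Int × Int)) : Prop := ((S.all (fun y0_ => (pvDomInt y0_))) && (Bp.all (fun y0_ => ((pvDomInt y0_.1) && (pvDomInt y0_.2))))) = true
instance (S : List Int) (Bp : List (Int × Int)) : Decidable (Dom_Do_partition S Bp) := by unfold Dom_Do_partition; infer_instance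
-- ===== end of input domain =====

-- B replaces A's forward index loop with pending current-trace accumulator by a single reversed
-- pass that builds the partition back-to-front (objective: alternative decomposition, same cost).

-- ===== PORT A =====
-- A-side helpers: the loop body and the final flush, named so the proofs can speak about them.
def pvBodyA (S : List Int) (Bp : List (Int × Int))
    (st : List (List Int) × List Int) (item : Int) : List (List Int) × List Int :=
  let C := st.2 ++ [PySem.List.pyGetD S item 0]
  if item ≠ (S.length : Int) - 1 ∧
      (PySem.List.pyGetD S item 0, PySem.List.pyGetD S (item + 1) 0) ∈ Bp then
    (st.1 ++ [C], ([] : List Int))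
  else
    (st.1, C)

def pvFinishA (st : List (List Int) × List Int) : List (List Int) :=
  if st.2 ≠ [] then st.1 ++ [st.2] else st.1

def Do_partition (S : List Int) (Bp : List (Int × Int)) : List (List Int) :=
  pvFinishA ((PySem.List.pyRange 0 (S.length : Int) 1).foldl (pvBodyA S Bp) ([], []))

-- ===== PORT B =====
-- B-side helper: the body of B's 'for x in reversed(S)' loop ('rev[-1].append(x)' is
-- 'dropLast ++ [last ++ [x]]'; rev[-1] / g[-1] are PySem.List.pyGetD _ (-1) _).
def pvStepB (Bp : List (Int × Int)) (rev : List (List Int)) (x : Int) : List (List Int) :=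
  if rev = [] then rev ++ [[x]]
  else if (x, PySem.List.pyGetD (PySem.List.pyGetD rev (-1) []) (-1) 0) ∈ Bp then
    rev ++ [[x]]
  else
    rev.dropLast ++ [PySem.List.pyGetD rev (-1) [] ++ [x]]

def Do_partition_alt (S : List Int) (Bp : List (Int × Int)) : List (List Int) :=
  let rev := S.reverse.foldl (pvStepB Bp) []
  -- 'rev.reverse()' then 'g.reverse()' for each trace g
  rev.reverse.map List.reverse

-- ===== PRECONDITION & SPEC =====
def Spec_Do_partition (S : List Int) (Bp : List (Int × Int)) (out : List (List Int)) : Prop := out = Do_partition_alt S Bp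
instance (S : List Int) (Bp : List (Int × Int)) (out : List (List Int)) : Decidable (Spec_Do_partition S Bp out) := by unfold Spec_Do_partition; infer_instance

-- ===== CLAIM (what is proved, stated in full; the proofs are below) =====
def Claim_equal_Do_partition : Prop := ∀ (S : List Int) (Bp : List (Int × Int)), Dom_Do_partition S Bp → Spec_Do_partition S Bp (Do_partition S Bp)

-- ===== LEMMAS AND PROOFS =====

-- reference recursion both ports are reduced to: split after every pair in Bp
def pvChunk (Bp : List (Int × Int)) : List Int → List (List Int)
  | [] => []
  | x :: rest =>
    match pvChunk Bp rest with
    | [] => [[x]]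
    | g :: gs =>
      if (x, PySem.List.pyGetD g 0 0) ∈ Bp then [x] :: g :: gs
      else (x :: g) :: gs

-- merge a pending current-trace C into the front of an already-partitioned suffix
def pvMerge (C : List Int) : List (List Int) → List (List Int)
  | [] => if C = [] then [] else [C]
  | g :: gs => (C ++ g) :: gs

-- pvChunk of a nonempty list starts with a trace whose first element is the list's head
lemma chunk_head (Bp : List (Int × Int)) (y : Int) (rest : List Int) :
    ∃ t gs, pvChunk Bp (y :: rest) = (y :: t) :: gs := by
  show ∃ t gs, (match pvChunk Bp rest with
    | [] => [[y]]
    | g :: gs =>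
      if (y, PySem.List.pyGetD g 0 0) ∈ Bp then [y] :: g :: gs
      else (y :: g) :: gs) = (y :: t) :: gs
  cases h : pvChunk Bp rest with
  | nil => exact ⟨[], [], rfl⟩
  | cons g gs =>
    by_cases hb : (y, PySem.List.pyGetD g 0 0) ∈ Bp
    · exact ⟨[], g :: gs, by simp [hb]⟩
    · exact ⟨g, gs, by simp [hb]⟩

lemma getD_of_drop (S : List Int) (i : Nat) (x : Int) (T : List Int)
    (h : S.drop i = x :: T) : PySem.List.pyGetD S (i : Int) 0 = x := by
  rw [PySem.List.pyGetD_natCast]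
  have h0 : (S.drop i)[0]? = some x := by rw [h]; rfl
  rw [List.getElem?_drop, Nat.add_zero] at h0
  simp [List.getD, h0]

-- A's loop, started at index i with state (P, C), finishes to P ++ (C merged into pvChunk of the suffix)
lemma loopA (Bp : List (Int × Int)) (S : List Int) :
    ∀ (T : List Int) (i : Nat), S.drop i = T → i + T.length = S.length →
    ∀ (P : List (List Int)) (C : List Int),
      pvFinishA ((PySem.List.pyRange (i : Int) (S.length : Int) 1).foldl (pvBodyA S Bp) (P, C)) =
        P ++ pvMerge C (pvChunk Bp T) := by
  intro T
  induction T with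
  | nil =>
    intro i hdrop hlen P C
    have hi : (i : Int) = (S.length : Int) := by simp at hlen; omega
    rw [PySem.List.pyRange_one_eq_nil (le_of_eq hi.symm)]
    simp only [List.foldl_nil, pvFinishA, pvMerge, pvChunk]
    by_cases hC : C = [] <;> simp [hC]
  | cons x rest ih =>
    intro i hdrop hlen P C
    have hlt : (i : Int) < (S.length : Int) := by simp at hlen ⊢; omega
    rw [PySem.List.pyRange_one_cons hlt]
    have hcast : (i : Int) + 1 = ((i + 1 : Nat) : Int) := by push_cast; ring
    have hdrop' : S.drop (i + 1) = rest := by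
      rw [← List.drop_drop, hdrop]; rfl
    have hx : PySem.List.pyGetD S (i : Int) 0 = x := getD_of_drop S i x rest hdrop
    simp only [List.foldl_cons]
    cases rest with
    | nil =>
      -- x is the last element: the break test is skipped
      rw [show pvBodyA S Bp (P, C) (i : Int) = (P, C ++ [x]) by
        simp only [pvBodyA, hx]
        rw [if_neg]
        intro h
        exact h.1 (by simp at hlen; omega)]
      rw [hcast, ih (i + 1) hdrop' (by simp at hlen ⊢; omega) P (C ++ [x])]
      simp [pvMerge, pvChunk]
    | cons y rest' =>
      have hy : PySem.List.pyGetD S ((i : Int) + 1) 0 = y := by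
        rw [hcast]; exact getD_of_drop S (i + 1) y rest' hdrop'
      have hne : (i : Int) ≠ (S.length : Int) - 1 := by
        simp only [List.length_cons] at hlen
        intro h; omega
      obtain ⟨t, gs, hrest⟩ := chunk_head Bp y rest'
      have halt : pvChunk Bp (x :: y :: rest') =
          if (x, y) ∈ Bp then [x] :: (y :: t) :: gs else (x :: y :: t) :: gs := by
        show (match pvChunk Bp (y :: rest') with
          | [] => [[x]]
          | g :: gs =>
            if (x, PySem.List.pyGetD g 0 0) ∈ Bp then [x] :: g :: gs
            else (x :: g) :: gs) = _
        rw [hrest]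
        by_cases hb : (x, y) ∈ Bp <;>
          simp [PySem.List.pyGetD_zero_cons, hb]
      by_cases hb : (x, y) ∈ Bp
      · rw [show pvBodyA S Bp (P, C) (i : Int) = (P ++ [C ++ [x]], []) by
          simp only [pvBodyA, hx, hy]
          rw [if_pos ⟨hne, hb⟩]]
        rw [hcast, ih (i + 1) hdrop' (by simp at hlen ⊢; omega) (P ++ [C ++ [x]]) []]
        rw [halt, if_pos hb, hrest]
        simp [pvMerge]
      · rw [show pvBodyA S Bp (P, C) (i : Int) = (P, C ++ [x]) by
          simp only [pvBodyA, hx, hy]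
          rw [if_neg (by intro ⟨_, h2⟩; exact hb h2)]]
        rw [hcast, ih (i + 1) hdrop' (by simp at hlen ⊢; omega) P (C ++ [x])]
        rw [halt, if_neg hb, hrest]
        simp [pvMerge]

-- B's reversed accumulation, undone by the final reversals, is pvChunk
lemma foldrB (Bp : List (Int × Int)) (S : List Int) :
    (S.foldr (fun x acc => pvStepB Bp acc x) []).reverse.map List.reverse = pvChunk Bp S := by
  induction S with
  | nil => simp [pvChunk]
  | cons x rest ih =>
    rw [List.foldr_cons]
    cases rest with
    | nil =>
      have : List.foldr (fun x acc => pvStepB Bp acc x) ([] : List (List Int)) [] = [] := rfl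
      rw [this]
      simp [pvStepB, pvChunk]
    | cons y rest' =>
      set R := List.foldr (fun x acc => pvStepB Bp acc x) ([] : List (List Int)) (y :: rest') with hR
      obtain ⟨t, gs, hrest⟩ := chunk_head Bp y rest'
      have hmap : R.reverse.map List.reverse = (y :: t) :: gs := by rw [ih, hrest]
      -- decompose R from the back: its last group is (y :: t).reverse
      have hRne : R ≠ [] := by
        intro h; rw [h] at hmap; simp at hmap
      have hRrev : R.reverse = ((y :: t).reverse) :: (gs.map List.reverse) := by
        have : R.reverse.map List.reverse = (y :: t) :: gs := hmap
        have h2 := congrArg (List.map List.reverse) this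
        simpa [List.map_map, Function.comp_def] using h2
      have hRsplit : R = (gs.map List.reverse).reverse ++ [(y :: t).reverse] := by
        have := congrArg List.reverse hRrev
        simpa using this
      have hlast : PySem.List.pyGetD R (-1) ([] : List Int) = (y :: t).reverse := by
        rw [hRsplit]; exact PySem.List.pyGetD_neg_one_append_singleton _ _ _
      have hlastlast : PySem.List.pyGetD ((y : Int) :: t).reverse (-1) 0 = y := by
        rw [List.reverse_cons]
        exact PySem.List.pyGetD_neg_one_append_singleton _ _ _
      have hdropLast : R.dropLast = (gs.map List.reverse).reverse := by
        rw [hRsplit, List.dropLast_concat]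
      show (pvStepB Bp R x).reverse.map List.reverse = pvChunk Bp (x :: y :: rest')
      have hchunk : pvChunk Bp (x :: y :: rest') =
          if (x, y) ∈ Bp then [x] :: (y :: t) :: gs else (x :: y :: t) :: gs := by
        show (match pvChunk Bp (y :: rest') with
          | [] => [[x]]
          | g :: gs =>
            if (x, PySem.List.pyGetD g 0 0) ∈ Bp then [x] :: g :: gs
            else (x :: g) :: gs) = _
        rw [hrest]
        by_cases hb : (x, y) ∈ Bp <;>
          simp [PySem.List.pyGetD_zero_cons, hb]
      rw [hchunk]
      by_cases hb : (x, y) ∈ Bp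
      · rw [show pvStepB Bp R x = R ++ [[x]] by
          rw [pvStepB, if_neg hRne, hlast, hlastlast, if_pos hb]]
        rw [if_pos hb]
        simp [hmap]
      · rw [show pvStepB Bp R x = R.dropLast ++ [(y :: t).reverse ++ [x]] by
          rw [pvStepB, if_neg hRne, hlast, hlastlast, if_neg hb]]
        rw [if_neg hb, hdropLast]
        simp only [List.reverse_append, List.reverse_cons, List.reverse_nil,
          List.nil_append, List.map_cons, List.reverse_reverse, List.map_map,
          Function.comp_def, List.singleton_append]
        simp

-- ===== VERDICT (by name: the statement is the Claim_ definition above) =====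
theorem Do_partition_spec : Claim_equal_Do_partition := by
  intro S Bp _
  show Do_partition S Bp = Do_partition_alt S Bp
  have hA := loopA Bp S S 0 (by simp) (by simp) [] []
  simp only [Nat.cast_zero] at hA
  have hB : Do_partition_alt S Bp = pvChunk Bp S := by
    rw [Do_partition_alt, List.foldl_reverse]
    exact foldrB Bp S
  rw [Do_partition, hA, hB, List.nil_append]
  cases hS : S with
  | nil => simp [pvMerge, pvChunk]
  | cons y rest =>
    obtain ⟨t, gs, hrest⟩ := chunk_head Bp y rest
    rw [hrest, pvMerge, List.nil_append]
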